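-- pv_equiv track=rewrite | github.com/MicnedSQ/siapwpa_ros2_project | simple_example/simple_example/ProcessImageNode.py | selectCentroids
-- ===== SOURCE A (Python) =====
-- def selectCentroids(centroids_list):
--   centroid_left_x = 0
--   centroid_left_y = 0
--   centroid_right_x = 1920
--   centroid_right_y = 1080
--
--   for cx, cy in centroids_list:
--     if (cx < 1920 / 2 and cx > centroid_left_x):
--       centroid_left_x = cx
--       centroid_left_y = cy
--     if (cx > 1920 / 2 and cx < centroid_right_x):
--       centroid_right_x = cx
--       centroid_right_y = cy
--   return centroid_left_x, centroid_left_y, centroid_right_x, centroid_right_y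
-- ===== SOURCE B (Python) =====
-- def selectCentroids(centroids_list):
--     left = [(cx, cy) for cx, cy in centroids_list if 0 < cx < 960]
--     right = [(cx, cy) for cx, cy in centroids_list if 960 < cx < 1920]
--     lx, ly = max(left, key=lambda p: p[0], default=(0, 0))
--     rx, ry = min(right, key=lambda p: p[0], default=(1920, 1080))
--     return lx, ly, rx, ry
-- ===== Notes on version B (the rewrite author's own statement) =====
-- stated objective: simpler
-- what changed: Replaces the single stateful loop with four mutable variables by a partition into two filtered lists followed by max/min with key and defaults for the empty sides.
import Mathlib
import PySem

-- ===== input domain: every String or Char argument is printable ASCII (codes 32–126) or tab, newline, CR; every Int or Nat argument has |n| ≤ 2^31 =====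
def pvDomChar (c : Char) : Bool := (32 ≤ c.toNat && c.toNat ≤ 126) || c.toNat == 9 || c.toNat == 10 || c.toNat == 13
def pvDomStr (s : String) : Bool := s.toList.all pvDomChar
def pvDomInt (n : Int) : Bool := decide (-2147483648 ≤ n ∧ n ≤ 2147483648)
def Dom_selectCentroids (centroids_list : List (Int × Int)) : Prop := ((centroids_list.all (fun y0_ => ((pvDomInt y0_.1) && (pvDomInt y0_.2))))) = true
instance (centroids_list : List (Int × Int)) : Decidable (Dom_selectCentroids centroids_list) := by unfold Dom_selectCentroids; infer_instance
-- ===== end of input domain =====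

-- B replaces A's stateful loop by filtering the two sides and taking max/min with defaults; same O(n) cost, simpler.

-- ===== PORT A =====
-- A's loop over four mutables (cx < 1920/2 is cx < 960.0 in Python; exact as cx < 960 on Int inputs).
def selectCentroids (centroids_list : List (Int × Int)) : Int × Int × Int × Int :=
  centroids_list.foldl
    (fun st p =>
      let st1 : Int × Int × Int × Int :=
        if p.1 < 960 ∧ p.1 > st.1 then (p.1, p.2, st.2.2.1, st.2.2.2) else st
      if p.1 > 960 ∧ p.1 < st1.2.2.1 then (st1.1, st1.2.1, p.1, p.2) else st1)
    (0, 0, 1920, 1080)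

-- ===== PORT B =====
def selectCentroids_alt (centroids_list : List (Int × Int)) : Int × Int × Int × Int :=
  let left := centroids_list.filter (fun p => 0 < p.1 ∧ p.1 < 960)
  let right := centroids_list.filter (fun p => 960 < p.1 ∧ p.1 < 1920)
  let l := (PySem.List.max? left (fun p => p.1)).getD (0, 0)
  let r := (PySem.List.min? right (fun p => p.1)).getD (1920, 1080)
  (l.1, l.2, r.1, r.2)

-- ===== PRECONDITION & SPEC =====
def Spec_selectCentroids (centroids_list : List (Int × Int)) (out : Int × Int × Int × Int) : Prop := out = selectCentroids_alt centroids_list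
instance (centroids_list : List (Int × Int)) (out : Int × Int × Int × Int) : Decidable (Spec_selectCentroids centroids_list out) := by unfold Spec_selectCentroids; infer_instance

-- ===== CLAIM (what is proved, stated in full; the proofs are below) =====
def Claim_equal_selectCentroids : Prop := ∀ (centroids_list : List (Int × Int)), Dom_selectCentroids centroids_list → Spec_selectCentroids centroids_list (selectCentroids centroids_list)

-- ===== LEMMAS AND PROOFS =====

-- A's single loop splits into independent left and right folds.
def stepL (a : Int × Int) (p : Int × Int) : Int × Int :=
  if p.1 < 960 ∧ p.1 > a.1 then p else a

def stepR (a : Int × Int) (p : Int × Int) : Int × Int :=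
  if p.1 > 960 ∧ p.1 < a.1 then p else a

theorem fold_split (xs : List (Int × Int)) (l r : Int × Int) :
    xs.foldl
      (fun st p =>
        let st1 : Int × Int × Int × Int :=
          if p.1 < 960 ∧ p.1 > st.1 then (p.1, p.2, st.2.2.1, st.2.2.2) else st
        if p.1 > 960 ∧ p.1 < st1.2.2.1 then (st1.1, st1.2.1, p.1, p.2) else st1)
      (l.1, l.2, r.1, r.2)
    = ((xs.foldl stepL l).1, (xs.foldl stepL l).2,
       (xs.foldl stepR r).1, (xs.foldl stepR r).2) := by
  induction xs generalizing l r with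
  | nil => rfl
  | cons p t ih =>
      simp only [List.foldl_cons, stepL, stepR]
      split_ifs with h1 h2 h2 <;>
        simpa [stepL, stepR] using ih _ _

-- the left fold is the running-max over the left-filtered list
theorem left_filter (xs : List (Int × Int)) : ∀ (a : Int × Int), 0 ≤ a.1 →
    xs.foldl stepL a
      = (xs.filter (fun p => 0 < p.1 ∧ p.1 < 960)).foldl
          (fun m p => if m.1 < p.1 then p else m) a := by
  induction xs with
  | nil => intro a _; rfl
  | cons p t ih =>
      intro a ha
      rw [List.foldl_cons, List.filter_cons]
      by_cases hp : 0 < p.1 ∧ p.1 < 960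
      · rw [if_pos (by simpa using hp), List.foldl_cons]
        have hstep : stepL a p = if a.1 < p.1 then p else a := by
          simp only [stepL]; split_ifs <;> first | rfl | omega
        rw [hstep]
        split_ifs with h
        · exact ih p (by omega)
        · exact ih a ha
      · rw [if_neg (by simpa using hp)]
        have hstep : stepL a p = a := by simp only [stepL]; rw [if_neg]; omega
        rw [hstep]; exact ih a ha

-- the right fold is the running-min over the right-filtered list
theorem right_filter (xs : List (Int × Int)) : ∀ (a : Int × Int), a.1 ≤ 1920 →
    xs.foldl stepR a
      = (xs.filter (fun p => 960 < p.1 ∧ p.1 < 1920)).foldl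
          (fun m p => if p.1 < m.1 then p else m) a := by
  induction xs with
  | nil => intro a _; rfl
  | cons p t ih =>
      intro a ha
      rw [List.foldl_cons, List.filter_cons]
      by_cases hp : 960 < p.1 ∧ p.1 < 1920
      · rw [if_pos (by simpa using hp), List.foldl_cons]
        have hstep : stepR a p = if p.1 < a.1 then p else a := by
          simp only [stepR]; split_ifs <;> first | rfl | omega
        rw [hstep]
        split_ifs with h
        · exact ih p (by omega)
        · exact ih a ha
      · rw [if_neg (by simpa using hp)]
        have hstep : stepR a p = a := by simp only [stepR]; rw [if_neg]; omega
        rw [hstep]; exact ih a ha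

-- Python's max/min with key over a nonempty list is the running-extremum fold (first extremal kept)
theorem max?_cons2 (a y : Int × Int) (t : List (Int × Int)) :
    PySem.List.max? (a :: y :: t) (fun p => p.1)
      = PySem.List.max? ((if a.1 < y.1 then y else a) :: t) (fun p => p.1) := by
  simp only [PySem.List.max?, List.foldl_cons]
  split_ifs <;> rfl

theorem max?_cons_fold (t : List (Int × Int)) (a : Int × Int) :
    PySem.List.max? (a :: t) (fun p => p.1)
      = some (t.foldl (fun m x => if m.1 < x.1 then x else m) a) := by
  induction t generalizing a with
  | nil => rfl
  | cons y t ih =>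
      rw [max?_cons2, ih, List.foldl_cons]

theorem min?_cons2 (a y : Int × Int) (t : List (Int × Int)) :
    PySem.List.min? (a :: y :: t) (fun p => p.1)
      = PySem.List.min? ((if y.1 < a.1 then y else a) :: t) (fun p => p.1) := by
  simp only [PySem.List.min?, List.foldl_cons]
  split_ifs <;> rfl

theorem min?_cons_fold (t : List (Int × Int)) (a : Int × Int) :
    PySem.List.min? (a :: t) (fun p => p.1)
      = some (t.foldl (fun m x => if x.1 < m.1 then x else m) a) := by
  induction t generalizing a with
  | nil => rfl
  | cons y t ih =>
      rw [min?_cons2, ih, List.foldl_cons]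

-- ===== VERDICT (by name: the statement is the Claim_ definition above) =====
theorem selectCentroids_spec : Claim_equal_selectCentroids := by
  intro xs _
  unfold Spec_selectCentroids selectCentroids selectCentroids_alt
  rw [show ((0 : Int), (0 : Int), (1920 : Int), (1080 : Int))
        = (((0 : Int), (0 : Int)).1, ((0 : Int), (0 : Int)).2,
           (((1920 : Int), (1080 : Int)).1, ((1920 : Int), (1080 : Int)).2)) from rfl,
      fold_split]
  rw [left_filter xs (0, 0) (by norm_num), right_filter xs (1920, 1080) (by norm_num)]
  simp only []  -- zeta-reduce the let-bindings of the B port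
  -- name the two filtered lists and case on their shape
  cases hL : xs.filter (fun p => 0 < p.1 ∧ p.1 < 960) with
  | nil => cases hR : xs.filter (fun p => 960 < p.1 ∧ p.1 < 1920) with
    | nil => simp [PySem.List.max?, PySem.List.min?]
    | cons q tr =>
        have hq : 960 < q.1 ∧ q.1 < 1920 := by
          have h := List.mem_filter.mp (hR ▸ List.mem_cons_self (l := tr))
          simpa using h.2
        rw [min?_cons_fold]
        simp [PySem.List.max?, hq.2]
  | cons q tl =>
      have hq : 0 < q.1 ∧ q.1 < 960 := by
        have h := List.mem_filter.mp (hL ▸ List.mem_cons_self (l := tl))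
        simpa using h.2
      cases hR : xs.filter (fun p => 960 < p.1 ∧ p.1 < 1920) with
      | nil =>
          rw [max?_cons_fold]
          simp [PySem.List.min?, hq.1]
      | cons r tr =>
          have hr : 960 < r.1 ∧ r.1 < 1920 := by
            have h := List.mem_filter.mp (hR ▸ List.mem_cons_self (l := tr))
            simpa using h.2
          rw [max?_cons_fold, min?_cons_fold]
          simp [hq.1, hr.2]
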